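-- pv_equiv track=rewrite | github.com/wilkin547/MAKE_Questions.py | python/python/practica 2.py | Make_Question_open
-- ===== SOURCE A (Python) =====
-- def comprueba_verbs(frase):
--
--
--     verbos = ["is","are","run","go","stay","swim"]
--
--     for verb in verbos:
--
--         if frase == verb + " ":
--             return True
--
--     return False
--
-- def Make_Question_open(palabras):
--
--     complento = ""
--     sujeto = ""
--     vervo = ""
--
--     isSubect = True
--     isComplemto = False
--     isVerb = False
--
--
--     for word in palabras:
--
--         if   comprueba_verbs(word):
--
--             isSubect = False
--             isVerb = True
--
--         if isSubect :
--
--             sujeto += word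
--
--
--         if isVerb :
--
--             vervo += word
--             isComplemto = True
--             isVerb = False
--             continue
--
--
--         if isComplemto :
--
--             complento += word
--
--
--     texto_final =  "what " + vervo +  complento + "? "
--     return texto_final
-- ===== SOURCE B (Python) =====
-- VERBS = {"is ", "are ", "run ", "go ", "stay ", "swim "}
--
-- def Make_Question_open(palabras):
--     first = next((i for i, w in enumerate(palabras) if w in VERBS), None)
--     if first is None:
--         return "what ? "
--     vervo = "".join(w for w in palabras if w in VERBS)
--     complento = "".join(w for w in palabras[first:] if w not in VERBS)
--     return "what " + vervo + complento + "? "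
-- ===== Notes on version B (the rewrite author's own statement) =====
-- stated objective: simpler
-- what changed: Replaced A's three-flag state machine (which also builds a discarded subject string via repeated concatenation) by a find-first-verb index plus two filter/join passes; no flags and no subject accumulator.
import Mathlib
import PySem

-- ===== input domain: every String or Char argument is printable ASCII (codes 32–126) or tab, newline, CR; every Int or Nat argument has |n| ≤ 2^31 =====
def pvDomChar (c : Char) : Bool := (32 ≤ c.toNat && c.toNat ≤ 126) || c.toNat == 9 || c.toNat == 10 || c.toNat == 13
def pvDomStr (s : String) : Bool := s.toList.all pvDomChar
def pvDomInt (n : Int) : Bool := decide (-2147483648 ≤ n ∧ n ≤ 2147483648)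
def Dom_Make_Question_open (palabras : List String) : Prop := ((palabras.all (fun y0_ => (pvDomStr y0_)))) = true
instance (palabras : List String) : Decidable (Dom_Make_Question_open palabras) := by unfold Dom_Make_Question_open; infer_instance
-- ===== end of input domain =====

-- B replaces A's three-flag state machine by find-first-verb + two filter/joins (simpler); same return value.
-- ===== PORT A =====
def comprueba_verbs (frase : String) : Bool :=
  (["is", "are", "run", "go", "stay", "swim"]).any (fun verb => frase == verb ++ " ")

def stepA (st : String × String × String × Bool × Bool × Bool) (word : String) :
    String × String × String × Bool × Bool × Bool :=
  let (complento, sujeto, vervo, isSubect, isComplemto, isVerb) := st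
  let (isSubect, isVerb) := if comprueba_verbs word then (false, true) else (isSubect, isVerb)
  let sujeto := if isSubect then sujeto ++ word else sujeto
  if isVerb then (complento, sujeto, vervo ++ word, isSubect, true, false)
  else if isComplemto then (complento ++ word, sujeto, vervo, isSubect, isComplemto, isVerb)
  else (complento, sujeto, vervo, isSubect, isComplemto, isVerb)

def Make_Question_open (palabras : List String) : String :=
  let st := palabras.foldl stepA ("", "", "", true, false, false)
  "what " ++ st.2.2.1 ++ st.1 ++ "? "

-- ===== PORT B =====
def verbSet : List String := ["is ", "are ", "run ", "go ", "stay ", "swim "]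

def isVerbW (w : String) : Bool := verbSet.contains w

-- "".join of a list of strings
def concatAll : List String → String
  | [] => ""
  | w :: t => w ++ concatAll t

def Make_Question_open_alt (palabras : List String) : String :=
  match palabras.findIdx? isVerbW with
  | none => "what ? "
  | some i =>
    let vervo := concatAll (palabras.filter isVerbW)
    let complento := concatAll ((palabras.drop i).filter (fun w => !isVerbW w))
    "what " ++ vervo ++ complento ++ "? "

-- ===== PRECONDITION & SPEC =====
def Spec_Make_Question_open (palabras : List String) (out : String) : Prop := out = Make_Question_open_alt palabras
instance (palabras : List String) (out : String) : Decidable (Spec_Make_Question_open palabras out) := by unfold Spec_Make_Question_open; infer_instance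

-- ===== CLAIM (what is proved, stated in full; the proofs are below) =====
def Claim_equal_Make_Question_open : Prop := ∀ (palabras : List String), Dom_Make_Question_open palabras → Spec_Make_Question_open palabras (Make_Question_open palabras)

-- ===== LEMMAS AND PROOFS =====

-- ===== VERDICT (by name: the statement is the Claim_ definition above) =====
lemma verb_eq (w : String) : comprueba_verbs w = isVerbW w := rfl

lemma foldl_post (rest : List String) (c s v : String) :
    List.foldl stepA (c, s, v, false, true, false) rest =
      (c ++ concatAll (rest.filter (fun w => !comprueba_verbs w)), s,
       v ++ concatAll (rest.filter comprueba_verbs), false, true, false) := by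
  induction rest generalizing c v with
  | nil => simp [concatAll]
  | cons w t ih =>
    cases h : comprueba_verbs w with
    | true =>
      simp [stepA, h, ih, concatAll, String.append_assoc]
    | false =>
      simp [stepA, h, ih, concatAll, String.append_assoc]

lemma main_aux (palabras : List String) (s : String) :
    "what " ++ (List.foldl stepA ("", s, "", true, false, false) palabras).2.2.1 ++
      (List.foldl stepA ("", s, "", true, false, false) palabras).1 ++ "? " =
      Make_Question_open_alt palabras := by
  induction palabras generalizing s with
  | nil => simp [Make_Question_open_alt]
  | cons w t ih =>
    cases h : comprueba_verbs w with
    | true =>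
      have hv : isVerbW w = true := verb_eq w ▸ h
      simp only [List.foldl_cons, stepA, h, if_true]
      rw [foldl_post]
      simp [Make_Question_open_alt, List.findIdx?_cons, hv, concatAll,
        String.append_assoc, verb_eq]
      exact congrArg concatAll (List.filter_congr fun w _ => verb_eq w)
    | false =>
      have hv : isVerbW w = false := verb_eq w ▸ h
      have hstep : stepA ("", s, "", true, false, false) w = ("", s ++ w, "", true, false, false) := by
        simp [stepA, h]
      rw [List.foldl_cons, hstep, ih]
      cases hf : t.findIdx? isVerbW with
      | none => simp [Make_Question_open_alt, List.findIdx?_cons, hv, hf]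
      | some i => simp [Make_Question_open_alt, List.findIdx?_cons, hv, hf]

-- ===== VERDICT (by name: the statement is the Claim_ definition above) =====
theorem Make_Question_open_spec : Claim_equal_Make_Question_open := by
  intro palabras _
  unfold Spec_Make_Question_open Make_Question_open
  exact main_aux palabras ""
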